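-- pv_equiv track=rewrite | github.com/ingktkhk/sfen_converter | sfen_converter.py | unpack_compact_row
-- ===== SOURCE A (Python) =====
-- def unpack_compact_row(row):
--     'Generate sfen string of @row, which has 0 for empty'
--     zrl = 0 # Zero Run Length
--     for s in row:
--         if not s:
--             zrl += 1
--         else:
--             if zrl:
--                 yield str(zrl)
--                 zrl = 0
--             yield s
--     if zrl:
--         yield str(zrl)
-- ===== SOURCE B (Python) =====
-- def unpack_compact_row(row):
--     'Generate sfen string of @row, which has 0 for empty'
--     row = list(row)
--     i, n = 0, len(row)
--     while i < n:
--         if row[i]: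
--             yield row[i]
--             i += 1
--         else:
--             j = i
--             while j < n and not row[j]:
--                 j += 1
--             yield str(j - i)
--             i = j
-- ===== Notes on version B (the rewrite author's own statement) =====
-- stated objective: alternative
-- what changed: Replaces the incremental zero-run-length accumulator with a trailing flush by an index loop that, on hitting an empty cell, scans the whole run at once and emits its length immediately; non-empty cells are emitted directly.
import Mathlib
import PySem

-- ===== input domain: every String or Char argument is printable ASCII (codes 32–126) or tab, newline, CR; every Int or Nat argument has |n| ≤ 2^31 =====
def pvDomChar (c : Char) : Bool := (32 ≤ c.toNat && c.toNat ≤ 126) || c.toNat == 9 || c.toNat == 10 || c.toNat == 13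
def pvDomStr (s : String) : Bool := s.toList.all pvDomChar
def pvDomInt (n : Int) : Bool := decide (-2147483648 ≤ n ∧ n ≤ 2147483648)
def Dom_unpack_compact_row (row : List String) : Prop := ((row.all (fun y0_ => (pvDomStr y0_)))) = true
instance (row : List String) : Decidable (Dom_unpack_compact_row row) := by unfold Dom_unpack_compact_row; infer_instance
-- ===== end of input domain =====

-- B replaces A's incremental zero-run counter (with trailing flush) by an index scan that
-- consumes each run of empties in one inner pass and emits its length immediately (objective: alternative).
-- Both A and B are Python generators; equivalence is about the sequence of yielded values (as a list).

-- ===== PORT A =====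
-- A's loop: zrl accumulator, flushed before a non-empty cell and at the end.
def pvGoA : List String → Nat → List String
  | [], zrl => if zrl ≠ 0 then [PySem.Int.toStr (zrl : Int)] else []
  | s :: rest, zrl =>
    if s = "" then pvGoA rest (zrl + 1)
    else (if zrl ≠ 0 then [PySem.Int.toStr (zrl : Int)] else []) ++ s :: pvGoA rest 0

def unpack_compact_row (row : List String) : List String := pvGoA row 0

-- ===== PORT B =====
-- B's inner while loop 'while j < n and not row[j]: j += 1' : count the run of empties and return the remainder.
def pvSpanEmpty : List String → Nat × List String
  | [] => (0, [])
  | s :: rest =>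
    if s = "" then ((pvSpanEmpty rest).1 + 1, (pvSpanEmpty rest).2)
    else (0, s :: rest)

theorem pvSpanEmpty_len_le : ∀ xs : List String, (pvSpanEmpty xs).2.length ≤ xs.length := by
  intro xs
  induction xs with
  | nil => simp [pvSpanEmpty]
  | cons s rest ih =>
    by_cases h : s = ""
    · simp [pvSpanEmpty, h]; omega
    · simp [pvSpanEmpty, h]

-- B's outer while loop over the index i.
def pvGoB : List String → List String
  | [] => []
  | s :: rest =>
    if s = "" then
      PySem.Int.toStr (((pvSpanEmpty (s :: rest)).1 : Int)) :: pvGoB (pvSpanEmpty (s :: rest)).2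
    else s :: pvGoB rest
termination_by xs => xs.length
decreasing_by
  all_goals have := pvSpanEmpty_len_le rest
  all_goals simp [pvSpanEmpty, *]

def unpack_compact_row_alt (row : List String) : List String := pvGoB row

-- ===== PRECONDITION & SPEC =====
def Spec_unpack_compact_row (row : List String) (out : List String) : Prop := out = unpack_compact_row_alt row
instance (row : List String) (out : List String) : Decidable (Spec_unpack_compact_row row out) := by unfold Spec_unpack_compact_row; infer_instance

-- ===== CLAIM (what is proved, stated in full; the proofs are below) =====
def Claim_equal_unpack_compact_row : Prop := ∀ (row : List String), Dom_unpack_compact_row row → Spec_unpack_compact_row row (unpack_compact_row row)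

-- ===== LEMMAS AND PROOFS =====
-- Joint invariant: with zero pending empties A's loop equals B's; with z+1 pending empties,
-- A's loop emits (z+1) plus the length of the leading empty run, then proceeds as B after that run.
theorem pvGoA_goB : ∀ xs : List String,
    pvGoA xs 0 = pvGoB xs ∧
    ∀ z : Nat, 0 < z → pvGoA xs z =
      PySem.Int.toStr (((z + (pvSpanEmpty xs).1 : Nat) : Int)) :: pvGoB (pvSpanEmpty xs).2 := by
  intro xs
  induction xs with
  | nil =>
    refine ⟨by simp [pvGoA, pvGoB], ?_⟩
    intro z hz
    simp [pvGoA, pvSpanEmpty, pvGoB, Nat.pos_iff_ne_zero.mp hz]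
  | cons s rest ih =>
    by_cases h : s = ""
    · subst h
      have hA : ∀ z : Nat, pvGoA ("" :: rest) z = pvGoA rest (z + 1) := by
        intro z; simp [pvGoA]
      have hspan : pvSpanEmpty ("" :: rest) = ((pvSpanEmpty rest).1 + 1, (pvSpanEmpty rest).2) := by
        simp [pvSpanEmpty]
      refine ⟨?_, ?_⟩
      · rw [pvGoB.eq_def]
        simp only [hspan]
        rw [hA 0, ih.2 1 (by omega)]
        congr 2
        omega
      · intro z hz
        rw [hA z, ih.2 (z + 1) (by omega)]
        simp only [hspan]
        congr 3
        omega
    · have hspan : pvSpanEmpty (s :: rest) = (0, s :: rest) := by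
        simp [pvSpanEmpty, h]
      refine ⟨?_, ?_⟩
      · rw [pvGoB.eq_def]
        simp [pvGoA, h, ih.1]
      · intro z hz
        rw [pvGoB.eq_def]
        simp only [pvGoA, hspan, if_neg h]
        simp [Nat.pos_iff_ne_zero.mp hz, ih.1]

-- ===== VERDICT (by name: the statement is the Claim_ definition above) =====
theorem unpack_compact_row_spec : Claim_equal_unpack_compact_row := by
  intro row _
  unfold Spec_unpack_compact_row unpack_compact_row unpack_compact_row_alt
  exact (pvGoA_goB row).1
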